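-- pv_equiv track=rewrite | github.com/dplocki/advent-of-code | 2019/2019_12.py | solution_for_second_task
-- ===== SOURCE A (Python) =====
-- import itertools
-- import math
--
-- AXIES_NUMBER = 3
--
-- def all_axies():
--     return range(AXIES_NUMBER)
--
-- def velocity_change_for_ax(position_a, velocity_a, position_b, velocity_b):
--     if position_a > position_b:
--         return velocity_a - 1, velocity_b + 1
--     elif position_a < position_b:
--         return velocity_a + 1, velocity_b - 1
--
--     return velocity_a, velocity_b
--
-- def step_generator(positions, velocities):
--     while True:
--         for a, b in itertools.combinations(positions.keys(), 2):
--             for ax in all_axies():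
--                 velocities[a][ax], velocities[b][ax] = velocity_change_for_ax(positions[a][ax], velocities[a][ax], positions[b][ax], velocities[b][ax])
--
--         for moon in positions.keys():
--             positions[moon] = [positions[moon][ax] + velocities[moon][ax] for ax in all_axies()]
--
--         yield positions, velocities
--
-- def get_initial_positions_and_velicities(moons_positions_list):
--     positions = {moon:position for moon, position in enumerate(moons_positions_list)}
--     velocities = {moon:[0, 0, 0] for moon, _ in enumerate(moons_positions_list)}
--
--     return positions, velocities
--
-- def solution_for_second_task(moons_positions_list):
--
--     def cycles_length_finder(positions, velocities):
--
--         def hash_state_on_ax(ax, positions, velocities):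
--             return tuple([(positions[moon][ax], velocities[moon][ax]) for moon in positions.keys()])
--
--         cycle_step_per_ax = {ax:None for ax in all_axies()}
--         positions_per_ax = {ax:set([hash_state_on_ax(ax, positions, velocities)]) for ax in all_axies()}
--
--         step = 1
--         for positions, velocities in step_generator(positions, velocities):
--             for ax in all_axies():
--                 tmp = hash_state_on_ax(ax, positions, velocities)
--                 if tmp in positions_per_ax[ax]:
--                     cycle_step_per_ax[ax] = cycle_step_per_ax[ax] or step
--
--                 positions_per_ax[ax].add(tmp)
--                 if not None in cycle_step_per_ax.values():
--                     return cycle_step_per_ax.values()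
--
--             step += 1
--
--     def lcm(x, y):
--         return (x*y) // math.gcd(x,y)
--
--     positions, velocities = get_initial_positions_and_velicities(moons_positions_list)
--     results = cycles_length_finder(positions, velocities)
--     prev = 1
--     for result in results:
--         prev = lcm(prev, result)
--
--     return prev
-- ===== SOURCE B (Python) =====
-- import math
--
-- def solution_for_second_task(moons_positions_list):
--     # Time-reversible dynamics: the first repeated per-axis state is the initial
--     # state, so each axis cycle is found by an independent 1-D simulation that
--     # compares against the initial (positions, velocities) tuple only.
--
--     def axis_cycle_length(axis_positions):
--         n = len(axis_positions)
--         initial = (tuple(axis_positions), (0,) * n)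
--         pos = list(axis_positions)
--         vel = [0] * n
--         steps = 0
--         while True:
--             vel = [v + sum((q > p) - (q < p) for q in pos) for p, v in zip(pos, vel)]
--             pos = [p + v for p, v in zip(pos, vel)]
--             steps += 1
--             if (tuple(pos), tuple(vel)) == initial:
--                 return steps
--
--     result = 1
--     for ax in range(3):
--         cycle = axis_cycle_length([moon[ax] for moon in moons_positions_list])
--         result = result * cycle // math.gcd(result, cycle)
--     return result
-- ===== Notes on version B (the rewrite author's own statement) =====
-- stated objective: alternative
-- what changed: B replaces A's single coupled 3-axis simulation with a growing per-axis set of seen states by three independent 1-D simulations that exploit time-reversibility: each axis is stepped until its (positions, velocities) tuple equals the initial tuple again, so only the initial state is stored and compared, and the three cycle lengths are folded with lcm.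
import Mathlib
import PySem

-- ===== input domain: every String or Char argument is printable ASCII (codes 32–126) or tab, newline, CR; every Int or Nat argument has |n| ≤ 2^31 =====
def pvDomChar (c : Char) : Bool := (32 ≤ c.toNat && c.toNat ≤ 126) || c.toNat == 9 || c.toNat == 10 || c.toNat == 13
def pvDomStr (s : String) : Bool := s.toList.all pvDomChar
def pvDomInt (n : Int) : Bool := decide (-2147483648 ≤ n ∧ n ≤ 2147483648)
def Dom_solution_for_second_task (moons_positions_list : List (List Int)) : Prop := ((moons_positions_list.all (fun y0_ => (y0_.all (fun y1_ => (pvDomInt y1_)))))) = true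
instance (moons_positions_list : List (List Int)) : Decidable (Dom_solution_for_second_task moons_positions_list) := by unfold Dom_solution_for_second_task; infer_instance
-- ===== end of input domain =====

-- B re-implements A per axis: three independent 1-D simulations that stop when the
-- axis state returns to its INITIAL value (the dynamics is time-reversible, so the
-- first repeat is the initial state), replacing A's coupled 3-axis loop with a
-- growing set of seen states; 'alternative' objective, same asymptotic cost.
-- Both loops in the Python sources are unbounded ('while True'); the ports guard
-- them with the same large fuel 'pvFuel' and return 0 on exhaustion (a totality
-- guard only: the Python programs do not return at all there).

-- ===== PORT A =====
def velocity_change_for_ax (pa va pb vb : Int) : Int × Int :=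
  if pa > pb then (va - 1, vb + 1)
  else if pa < pb then (va + 1, vb - 1)
  else (va, vb)

-- positions/velocities: dicts keyed by enumerate(...) = 0..n-1 in order, kept as lists;
-- aGetG X m ax = X[m][ax], aSetG writes X[m][ax] (in range on every admitted input)
def aGetG (X : List (List Int)) (m ax : Nat) : Int := (X.getD m []).getD ax 0
def aSetG (X : List (List Int)) (m ax : Nat) (v : Int) : List (List Int) :=
  X.set m ((X.getD m []).set ax v)

-- itertools.combinations(positions.keys(), 2) with keys 0..n-1 (lexicographic pairs)
def aCombos (n : Nat) : List (Nat × Nat) :=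
  (List.range n).flatMap (fun i => (List.range' (i + 1) (n - 1 - i)).map (fun j => (i, j)))

-- the inner 'for ax in all_axies()' loop of step_generator for one pair (a, b)
def aPairUpdate (P V : List (List Int)) (a b : Nat) : List (List Int) :=
  (List.range 3).foldl (fun V ax =>
    let r := velocity_change_for_ax (aGetG P a ax) (aGetG V a ax) (aGetG P b ax) (aGetG V b ax)
    aSetG (aSetG V a ax r.1) b ax r.2) V

def aGravity (P V : List (List Int)) : List (List Int) :=
  (aCombos P.length).foldl (fun V ab => aPairUpdate P V ab.1 ab.2) V

-- one yield of step_generator: gravity pass, then positions[moon] rebuilt per axis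
def aStep (P V : List (List Int)) : List (List Int) × List (List Int) :=
  let V' := aGravity P V
  ((List.range P.length).map (fun m => (List.range 3).map (fun ax => aGetG P m ax + aGetG V' m ax)), V')

-- hash_state_on_ax
def aHash (ax : Nat) (P V : List (List Int)) : List (Int × Int) :=
  (List.range P.length).map (fun m => (aGetG P m ax, aGetG V m ax))

-- the 'for ax in all_axies()' body of cycles_length_finder (early return = Sum.inl)
def aAxLoop (P V : List (List Int)) (step : Int) :
    List Nat → List (PySem.Set (List (Int × Int))) → List (Option Int) →
    (List (Option Int)) ⊕ (List (PySem.Set (List (Int × Int))) × List (Option Int))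
  | [], sets, cycles => Sum.inr (sets, cycles)
  | ax :: rest, sets, cycles =>
      let tmp := aHash ax P V
      let s := sets.getD ax (PySem.Set.ofList [])
      let cycles' := if PySem.Set.contains s tmp then
          cycles.set ax (some ((cycles.getD ax none).getD step)) else cycles
      let sets' := sets.set ax (PySem.Set.add s tmp)
      if cycles'.contains none then aAxLoop P V step rest sets' cycles'
      else Sum.inl cycles'

-- fuel guard for the unbounded 'for ... in step_generator(...)' loop
def pvFuel : Nat := 4611686018427387904

def aLoop : Nat → List (List Int) → List (List Int) →
    List (PySem.Set (List (Int × Int))) → List (Option Int) → Int → Option (List (Option Int))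
  | 0, _, _, _, _, _ => none
  | fuel + 1, P, V, sets, cycles, step =>
      let PV := aStep P V
      match aAxLoop PV.1 PV.2 step (List.range 3) sets cycles with
      | Sum.inl res => some res
      | Sum.inr sc => aLoop fuel PV.1 PV.2 sc.1 sc.2 (step + 1)

-- lcm(x, y) = (x*y) // math.gcd(x, y)  (identical helper in both Python sources)
def pyLcm (x y : Int) : Int := PySem.Int.floordiv (x * y) (Int.ofNat (x.gcd y))

def solution_for_second_task (moons_positions_list : List (List Int)) : Int :=
  let positions := moons_positions_list
  let velocities := moons_positions_list.map (fun _ => [0, 0, 0])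
  let sets0 := (List.range 3).map (fun ax => PySem.Set.ofList [aHash ax positions velocities])
  let cycles0 : List (Option Int) := (List.range 3).map (fun _ => none)
  match aLoop pvFuel positions velocities sets0 cycles0 1 with
  | some results => results.foldl (fun prev r => pyLcm prev (r.getD 0)) 1
  | none => 0

-- ===== PORT B =====
-- (q > p) - (q < p)
def bSign (p q : Int) : Int := (if q > p then 1 else 0) - (if q < p then 1 else 0)

-- one simulation step of B's 1-D system
def bAxisStep (pv : List Int × List Int) : List Int × List Int :=
  let vel := (pv.1.zip pv.2).map (fun x => x.2 + (pv.1.map (fun q => bSign x.1 q)).sum)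
  let pos := (pv.1.zip vel).map (fun x => x.1 + x.2)
  (pos, vel)

-- the 'while True' of axis_cycle_length, with the same fuel guard
def bAxisLoop (initial : List Int × List Int) :
    List Int × List Int → Int → Nat → Option Int
  | _, _, 0 => none
  | pv, steps, fuel + 1 =>
      let pv' := bAxisStep pv
      let steps' := steps + 1
      if pv' = initial then some steps' else bAxisLoop initial pv' steps' fuel

def bAxisCycleLength (axis_positions : List Int) : Option Int :=
  bAxisLoop (axis_positions, List.replicate axis_positions.length 0)
    (axis_positions, List.replicate axis_positions.length 0) 0 pvFuel

def solution_for_second_task_alt (moons_positions_list : List (List Int)) : Int :=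
  match (List.range 3).foldl (fun acc ax =>
      match acc, bAxisCycleLength (moons_positions_list.map (fun moon => moon.getD ax 0)) with
      | some result, some cycle => some (pyLcm result cycle)
      | _, _ => none) (some 1) with
  | some result => result
  | none => 0

-- ===== PRECONDITION & SPEC =====
-- Pre_ excludes exactly the inputs where the Python A raises IndexError: a moon
-- whose position list has fewer than 3 coordinates (A indexes every moon at axes 0..2).
def Pre_solution_for_second_task (moons_positions_list : List (List Int)) : Prop :=
  ∀ moon ∈ moons_positions_list, 3 ≤ moon.length
instance (moons_positions_list : List (List Int)) : Decidable (Pre_solution_for_second_task moons_positions_list) := by unfold Pre_solution_for_second_task; infer_instance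

def pvWitness_solution_for_second_task : List (List Int) := [[-1, 0, 2], [2, -10, -7]]

def Spec_solution_for_second_task (moons_positions_list : List (List Int)) (out : Int) : Prop := out = solution_for_second_task_alt moons_positions_list
instance (moons_positions_list : List (List Int)) (out : Int) : Decidable (Spec_solution_for_second_task moons_positions_list out) := by unfold Spec_solution_for_second_task; infer_instance

-- ===== CLAIM (what is proved, stated in full; the proofs are below) =====
def Claim_equal_solution_for_second_task : Prop := ∀ (moons_positions_list : List (List Int)), Dom_solution_for_second_task moons_positions_list → Pre_solution_for_second_task moons_positions_list → Spec_solution_for_second_task moons_positions_list (solution_for_second_task moons_positions_list)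

-- ===== LEMMAS AND PROOFS =====

-- ---- projection basics ----

def projP (ax : Nat) (X : List (List Int)) : List Int := X.map (fun row => row.getD ax 0)

def RowsOk (X : List (List Int)) : Prop := ∀ row ∈ X, 3 ≤ row.length

theorem length_projP (ax : Nat) (X : List (List Int)) : (projP ax X).length = X.length := by
  simp [projP]

theorem getG_proj (X : List (List Int)) (m ax : Nat) :
    aGetG X m ax = (projP ax X).getD m 0 := by
  by_cases h : m < X.length
  · simp [aGetG, projP, List.getD_eq_getElem?_getD, h]
  · simp [aGetG, projP, List.getD_eq_getElem?_getD,
      List.getElem?_eq_none_iff.mpr (by simpa using le_of_not_gt h)]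

theorem getD_set_ne' (row : List Int) (ax ax' : Nat) (v : Int) (h : ax ≠ ax') :
    (row.set ax v).getD ax' 0 = row.getD ax' 0 := by
  simp [List.getD_eq_getElem?_getD, List.getElem?_set_ne h]

theorem set_getD_self (l : List Int) (m : Nat) : l.set m (l.getD m 0) = l := by
  by_cases h : m < l.length
  · rw [List.getD_eq_getElem?_getD, List.getElem?_eq_getElem h]
    exact List.set_getElem_self h
  · exact List.set_eq_of_length_le (le_of_not_gt h)

theorem getD_set_self' (l : List Int) (m : Nat) (v : Int) (h : m < l.length) :
    (l.set m v).getD m 0 = v := by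
  rw [List.getD_eq_getElem?_getD, List.getElem?_set_self h]; rfl

theorem projP_set (X : List (List Int)) (r : List Int) (m ax : Nat) :
    projP ax (X.set m r) = (projP ax X).set m (r.getD ax 0) := by
  simp [projP, List.map_set]

theorem projP_setG_ne (X : List (List Int)) (m ax ax' : Nat) (v : Int) (h : ax ≠ ax') :
    projP ax' (aSetG X m ax v) = projP ax' X := by
  rw [aSetG, projP_set, getD_set_ne' _ _ _ _ h,
      show (X.getD m []).getD ax' 0 = aGetG X m ax' from rfl, getG_proj, set_getD_self]

theorem projP_setG_self (X : List (List Int)) (m ax : Nat) (v : Int)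
    (hX : RowsOk X) (hax : ax < 3) :
    projP ax (aSetG X m ax v) = (projP ax X).set m v := by
  rw [aSetG, projP_set]
  by_cases hm : m < X.length
  · have hrow : 3 ≤ (X.getD m []).length := by
      rw [List.getD_eq_getElem?_getD, List.getElem?_eq_getElem hm]
      exact hX _ (List.getElem_mem hm)
    rw [getD_set_self' _ _ _ (lt_of_lt_of_le hax hrow)]
  · have h1 : X.length ≤ m := le_of_not_gt hm
    rw [List.set_eq_of_length_le (by simpa [projP] using h1),
        List.set_eq_of_length_le (by simpa [projP] using h1)]

theorem rowsOk_setG (X : List (List Int)) (m ax : Nat) (v : Int) (hX : RowsOk X) :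
    RowsOk (aSetG X m ax v) := by
  intro row hrow
  by_cases hm : m < X.length
  · rcases List.mem_or_eq_of_mem_set hrow with h | h
    · exact hX _ h
    · subst h
      rw [List.length_set, List.getD_eq_getElem?_getD, List.getElem?_eq_getElem hm]
      exact hX _ (List.getElem_mem hm)
  · rw [aSetG, List.set_eq_of_length_le (le_of_not_gt hm)] at hrow
    exact hX _ hrow

theorem length_setG (X : List (List Int)) (m ax : Nat) (v : Int) :
    (aSetG X m ax v).length = X.length := by simp [aSetG]

-- ---- the pair/axis velocity update, projected to one axis ----

def upd1D (ps vs : List Int) (a b : Nat) : List Int :=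
  let r := velocity_change_for_ax (ps.getD a 0) (vs.getD a 0) (ps.getD b 0) (vs.getD b 0)
  (vs.set a r.1).set b r.2

def grav1D (ps : List Int) (l : List (Nat × Nat)) (vs : List Int) : List Int :=
  l.foldl (fun vs ab => upd1D ps vs ab.1 ab.2) vs

def aPairAx (P V : List (List Int)) (a b ax : Nat) : List (List Int) :=
  let r := velocity_change_for_ax (aGetG P a ax) (aGetG V a ax) (aGetG P b ax) (aGetG V b ax)
  aSetG (aSetG V a ax r.1) b ax r.2

theorem pairUpdate_eq_foldAx (P V : List (List Int)) (a b : Nat) :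
    aPairUpdate P V a b = (List.range 3).foldl (fun V ax => aPairAx P V a b ax) V := rfl

theorem rowsOk_pairAx (P V : List (List Int)) (a b ax : Nat) (hV : RowsOk V) :
    RowsOk (aPairAx P V a b ax) := by
  unfold aPairAx
  exact rowsOk_setG _ _ _ _ (rowsOk_setG _ _ _ _ hV)

theorem length_pairAx (P V : List (List Int)) (a b ax : Nat) :
    (aPairAx P V a b ax).length = V.length := by
  unfold aPairAx; rw [length_setG, length_setG]

theorem pairAx_proj_ne (P V : List (List Int)) (a b t ax : Nat) (h : t ≠ ax) :
    projP ax (aPairAx P V a b t) = projP ax V := by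
  unfold aPairAx
  rw [projP_setG_ne _ _ _ _ _ h, projP_setG_ne _ _ _ _ _ h]

theorem pairAx_proj_self (P V : List (List Int)) (a b ax : Nat)
    (hV : RowsOk V) (hax : ax < 3) :
    projP ax (aPairAx P V a b ax) = upd1D (projP ax P) (projP ax V) a b := by
  unfold aPairAx upd1D
  rw [getG_proj P a, getG_proj V a, getG_proj P b, getG_proj V b]
  rw [projP_setG_self _ _ _ _ (rowsOk_setG _ _ _ _ hV) hax, projP_setG_self _ _ _ _ hV hax]

theorem rowsOk_pairUpdate (P V : List (List Int)) (a b : Nat) (hV : RowsOk V) :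
    RowsOk (aPairUpdate P V a b) := by
  rw [pairUpdate_eq_foldAx]
  rw [show List.range 3 = [0, 1, 2] from by decide]
  simp only [List.foldl_cons, List.foldl_nil]
  exact rowsOk_pairAx _ _ _ _ _ (rowsOk_pairAx _ _ _ _ _ (rowsOk_pairAx _ _ _ _ _ hV))

theorem length_pairUpdate (P V : List (List Int)) (a b : Nat) :
    (aPairUpdate P V a b).length = V.length := by
  rw [pairUpdate_eq_foldAx, show List.range 3 = [0, 1, 2] from by decide]
  simp only [List.foldl_cons, List.foldl_nil]
  rw [length_pairAx, length_pairAx, length_pairAx]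

theorem pairUpdate_proj (P V : List (List Int)) (a b ax : Nat)
    (hV : RowsOk V) (hax : ax < 3) :
    projP ax (aPairUpdate P V a b) = upd1D (projP ax P) (projP ax V) a b := by
  rw [pairUpdate_eq_foldAx, show List.range 3 = [0, 1, 2] from by decide]
  simp only [List.foldl_cons, List.foldl_nil]
  interval_cases ax
  · rw [pairAx_proj_ne _ _ _ _ _ _ (by decide), pairAx_proj_ne _ _ _ _ _ _ (by decide),
      pairAx_proj_self _ _ _ _ _ hV (by decide)]
  · rw [pairAx_proj_ne _ _ _ _ _ _ (by decide),
      pairAx_proj_self _ _ _ _ _ (rowsOk_pairAx _ _ _ _ _ hV) (by decide),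
      pairAx_proj_ne _ _ _ _ _ _ (by decide)]
  · rw [pairAx_proj_self _ _ _ _ _ (rowsOk_pairAx _ _ _ _ _ (rowsOk_pairAx _ _ _ _ _ hV)) (by decide),
      pairAx_proj_ne _ _ _ _ _ _ (by decide), pairAx_proj_ne _ _ _ _ _ _ (by decide)]

theorem rowsOk_foldPairs (P : List (List Int)) (l : List (Nat × Nat)) :
    ∀ V, RowsOk V → RowsOk (l.foldl (fun V ab => aPairUpdate P V ab.1 ab.2) V) := by
  induction l with
  | nil => intro V hV; exact hV
  | cons ab l ih => intro V hV; exact ih _ (rowsOk_pairUpdate _ _ _ _ hV)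

theorem length_foldPairs (P : List (List Int)) (l : List (Nat × Nat)) :
    ∀ V, (l.foldl (fun V ab => aPairUpdate P V ab.1 ab.2) V).length = V.length := by
  induction l with
  | nil => intro V; rfl
  | cons ab l ih => intro V; rw [List.foldl_cons, ih, length_pairUpdate]

theorem foldPairs_proj (P : List (List Int)) (ax : Nat) (hax : ax < 3) (l : List (Nat × Nat)) :
    ∀ V, RowsOk V →
      projP ax (l.foldl (fun V ab => aPairUpdate P V ab.1 ab.2) V) =
        grav1D (projP ax P) l (projP ax V) := by
  induction l with
  | nil => intro V _; rfl
  | cons ab l ih =>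
      intro V hV
      rw [List.foldl_cons, ih _ (rowsOk_pairUpdate _ _ _ _ hV), pairUpdate_proj _ _ _ _ _ hV hax]
      rfl

theorem gravity_proj (P V : List (List Int)) (ax : Nat) (hax : ax < 3) (hV : RowsOk V) :
    projP ax (aGravity P V) = grav1D (projP ax P) (aCombos P.length) (projP ax V) := by
  unfold aGravity
  exact foldPairs_proj P ax hax _ V hV

theorem rowsOk_gravity (P V : List (List Int)) (hV : RowsOk V) : RowsOk (aGravity P V) :=
  rowsOk_foldPairs P _ V hV

theorem length_gravity (P V : List (List Int)) : (aGravity P V).length = V.length :=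
  length_foldPairs P _ V

-- ---- pointwise value of the 1-D pair fold ----

def contrib (ps : List Int) (i : Nat) (ab : Nat × Nat) : Int :=
  (if ab.1 = i then bSign (ps.getD i 0) (ps.getD ab.2 0) else 0) +
  (if ab.2 = i then bSign (ps.getD i 0) (ps.getD ab.1 0) else 0)

theorem vchange_sign (pa va pb vb : Int) :
    velocity_change_for_ax pa va pb vb = (va + bSign pa pb, vb + bSign pb pa) := by
  unfold velocity_change_for_ax bSign
  split_ifs <;> simp [Prod.ext_iff] <;> omega

theorem length_upd1D (ps vs : List Int) (a b : Nat) : (upd1D ps vs a b).length = vs.length := by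
  simp [upd1D]

theorem upd1D_getD (ps vs : List Int) (a b i : Nat)
    (hab : a ≠ b) (hi : i < vs.length) :
    (upd1D ps vs a b).getD i 0 = vs.getD i 0 + contrib ps i (a, b) := by
  unfold upd1D
  rw [vchange_sign]
  rcases eq_or_ne i b with rfl | hib
  · rw [getD_set_self' _ _ _ (by simpa using hi)]
    have h1 : ¬ a = i := fun h => hab h
    simp [contrib, h1]
  · have h2 : ¬ b = i := fun h => hib h.symm
    rw [getD_set_ne' _ _ _ _ h2]
    rcases eq_or_ne i a with rfl | hia
    · rw [getD_set_self' _ _ _ hi]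
      simp [contrib, h2]
    · have h3 : ¬ a = i := fun h => hia h.symm
      rw [getD_set_ne' _ _ _ _ h3]
      simp [contrib, h2, h3]

theorem length_grav1D (ps : List Int) (l : List (Nat × Nat)) :
    ∀ vs, (grav1D ps l vs).length = vs.length := by
  induction l with
  | nil => intro vs; rfl
  | cons ab l ih => intro vs; rw [grav1D, List.foldl_cons, ← grav1D, ih, length_upd1D]

theorem grav1D_getD (ps : List Int) (i : Nat) (l : List (Nat × Nat)) :
    ∀ vs, (∀ ab ∈ l, ab.1 ≠ ab.2) → i < vs.length →
      (grav1D ps l vs).getD i 0 = vs.getD i 0 + (l.map (contrib ps i)).sum := by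
  induction l with
  | nil => intro vs _ _; simp [grav1D]
  | cons ab l ih =>
      intro vs hl hi
      rw [grav1D, List.foldl_cons, ← grav1D,
        ih _ (fun x hx => hl x (List.mem_cons_of_mem _ hx)) (by rw [length_upd1D]; exact hi),
        upd1D_getD _ _ _ _ _ (hl ab (List.mem_cons_self)) hi]
      simp
      ring

-- ---- summing the contributions over all combinations ----

theorem bSign_self (p : Int) : bSign p p = 0 := by simp [bSign]

theorem sum_map_ite_mem (c : Int) (L : List Nat) (i : Nat) (hL : L.Nodup) :
    (L.map (fun j => if j = i then c else 0)).sum = if i ∈ L then c else 0 := by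
  induction L with
  | nil => simp
  | cons x L ih =>
      rcases List.nodup_cons.mp hL with ⟨hx, hL'⟩
      rcases eq_or_ne x i with rfl | hxi
      · rw [List.map_cons, List.sum_cons, if_pos rfl, if_pos (List.mem_cons_self),
          ih hL', if_neg hx]
        ring
      · rw [List.map_cons, List.sum_cons, if_neg hxi, ih hL']
        rcases Decidable.em (i ∈ L) with h | h
        · rw [if_pos h, if_pos (List.mem_cons_of_mem _ h)]; ring
        · rw [if_neg h, if_neg (by simp [hxi.symm, h])]; ring

theorem mem_aCombos (n : Nat) (ab : Nat × Nat) (h : ab ∈ aCombos n) :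
    ab.1 < n ∧ ab.2 < n ∧ ab.1 < ab.2 := by
  simp only [aCombos, List.mem_flatMap, List.mem_map, List.mem_range] at h
  obtain ⟨i, hi, j, hj, rfl⟩ := h
  have := List.mem_range'_1.mp hj
  exact ⟨hi, by omega, by omega⟩

theorem combos_contrib_sum (ps : List Int) (n i : Nat) (hi : i < n) :
    ((aCombos n).map (contrib ps i)).sum =
      ((List.range n).map (fun j => bSign (ps.getD i 0) (ps.getD j 0))).sum := by
  set f : Nat → Int := fun j => bSign (ps.getD i 0) (ps.getD j 0) with hf
  have hsum : ∀ (l : List Nat) (g : Nat → List (Nat × Nat)),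
      ((l.flatMap g).map (contrib ps i)).sum
        = (l.map (fun x => ((g x).map (contrib ps i)).sum)).sum := by
    intro l g
    rw [List.map_flatMap, List.flatMap_def, List.sum_flatten, List.map_map]
    rfl
  rw [aCombos, hsum]
  have hinner : ∀ i' ∈ List.range n,
      (((List.range' (i' + 1) (n - 1 - i')).map (fun j => (i', j))).map (contrib ps i)).sum
        = if i' = i then ((List.range' (i + 1) (n - 1 - i)).map f).sum
          else if i' < i then f i' else 0 := by
    intro i' _
    rw [List.map_map]
    rcases eq_or_ne i' i with h | hne
    · rw [h, if_pos rfl]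
      apply congrArg
      apply List.map_congr_left
      intro j hj
      have hj' := List.mem_range'_1.mp hj
      have hji : ¬ j = i := by omega
      simp [Function.comp_apply, contrib, hji, hf]
    · rw [if_neg hne]
      have hcongr : ∀ j ∈ List.range' (i' + 1) (n - 1 - i'),
          (contrib ps i ∘ fun j => (i', j)) j = if j = i then f i' else 0 := by
        intro j hj
        simp only [Function.comp_apply, contrib, if_neg hne]
        rcases eq_or_ne j i with h | hji
        · rw [h]; simp [hf]
        · simp [hji]
      rw [List.map_congr_left hcongr, sum_map_ite_mem _ _ _ (List.nodup_range' ..)]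
      rcases Nat.lt_or_ge i' i with hlt | hge
      · rw [if_pos (List.mem_range'_1.mpr ⟨by omega, by omega⟩), if_pos hlt]
      · rw [if_neg (fun hmem => by have := List.mem_range'_1.mp hmem; omega),
          if_neg (by omega)]
  rw [List.map_congr_left hinner]
  have hdecomp : List.range n = List.range' 0 i ++ i :: List.range' (i + 1) (n - 1 - i) := by
    rw [List.range_eq_range']
    have h1 : List.range' 0 i ++ List.range' (0 + i) (n - i) = List.range' 0 (i + (n - i)) := by
      have := @List.range'_append 0 i (n - i) 1; simpa using this
    rw [show i + (n - i) = n from by omega] at h1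
    rw [← h1, show (0 : Nat) + i = i from by omega,
      show n - i = (n - 1 - i) + 1 from by omega, List.range'_succ]
  rw [hdecomp]
  simp only [List.map_append, List.sum_append, List.map_cons, List.sum_cons]
  have hlow : (List.range' 0 i).map
      (fun i' => if i' = i then ((List.range' (i + 1) (n - 1 - i)).map f).sum
        else if i' < i then f i' else 0) = (List.range' 0 i).map f := by
    apply List.map_congr_left
    intro x hx
    have := List.mem_range'_1.mp hx
    rw [if_neg (by omega), if_pos (by omega)]
  have hhigh : (List.range' (i + 1) (n - 1 - i)).map
      (fun i' => if i' = i then ((List.range' (i + 1) (n - 1 - i)).map f).sum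
        else if i' < i then f i' else 0)
      = (List.range' (i + 1) (n - 1 - i)).map (fun _ => (0 : Int)) := by
    apply List.map_congr_left
    intro x hx
    have := List.mem_range'_1.mp hx
    rw [if_neg (by omega), if_neg (by omega)]
  have hzero : ((List.range' (i + 1) (n - 1 - i)).map (fun _ => (0 : Int))).sum = 0 := by simp
  rw [hlow, hhigh, hzero]
  have hfi : f i = 0 := by rw [hf]; exact bSign_self _
  simp [hfi]

-- ---- one coupled step projects to one 1-D step ----

theorem map_eq_map_range (L : List Int) (f : Int → Int) :
    L.map f = (List.range L.length).map (fun j => f (L.getD j 0)) := by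
  apply List.ext_getElem
  · simp
  · intro i h1 h2
    simp only [List.getElem_map, List.getElem_range]
    rw [List.getD_eq_getElem?_getD, List.getElem?_eq_getElem (by simpa using h1)]
    rfl

theorem grav1D_eq_bvel (ps vs : List Int) (h : vs.length = ps.length) :
    grav1D ps (aCombos ps.length) vs
      = (ps.zip vs).map (fun x => x.2 + (ps.map (fun q => bSign x.1 q)).sum) := by
  apply List.ext_getElem
  · rw [length_grav1D]; simp [h]
  · intro i h1 h2
    have hi : i < vs.length := by rwa [length_grav1D] at h1
    have hin : i < ps.length := h ▸ hi
    rw [← List.getD_eq_getElem (grav1D ps (aCombos ps.length) vs) 0 h1,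
      grav1D_getD _ _ _ _ (fun ab hab => Nat.ne_of_lt (mem_aCombos _ _ hab).2.2) hi,
      combos_contrib_sum _ _ _ hin]
    simp only [List.getElem_map, List.getElem_zip]
    rw [map_eq_map_range ps (fun q => bSign (ps[i]'hin) q)]
    rw [List.getD_eq_getElem vs 0 hi, List.getD_eq_getElem ps 0 hin]

theorem length_step_fst (P V : List (List Int)) : (aStep P V).1.length = P.length := by
  simp [aStep]

theorem step_proj (P V : List (List Int)) (ax : Nat)
    (hV : RowsOk V) (hlen : V.length = P.length) (hax : ax < 3) :
    (projP ax (aStep P V).1, projP ax (aStep P V).2)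
      = bAxisStep (projP ax P, projP ax V) := by
  have hvel : projP ax (aStep P V).2
      = ((projP ax P).zip (projP ax V)).map
          (fun x => x.2 + ((projP ax P).map (fun q => bSign x.1 q)).sum) := by
    show projP ax (aGravity P V) = _
    rw [gravity_proj _ _ _ hax hV,
      show P.length = (projP ax P).length from (length_projP ax P).symm,
      grav1D_eq_bvel _ _ (by rw [length_projP, length_projP]; exact hlen)]
  apply Prod.ext
  · show projP ax (aStep P V).1 = (bAxisStep (projP ax P, projP ax V)).1
    have h2 : (bAxisStep (projP ax P, projP ax V)).1
        = ((projP ax P).zip (projP ax (aStep P V).2)).map (fun x => x.1 + x.2) := by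
      rw [bAxisStep]
      simp only []
      rw [hvel]
    rw [h2]
    apply List.ext_getElem
    · simp only [projP, aStep, List.length_map, List.length_zip, List.length_range,
        length_gravity]
      omega
    · intro i h1 h2
      have hiP : i < P.length := by
        simpa [projP, aStep] using h1
      simp only [projP, aStep, List.getElem_map, List.getElem_zip, List.getElem_range]
      rw [show ∀ (L : List Int) (d : Int), L.getD ax d = L.getD ax d from fun _ _ => rfl]
      rw [List.getD_eq_getElem?_getD, List.getElem?_eq_getElem
        (by simpa using hax : ax < ((List.range 3).map
          (fun ax' => aGetG P i ax' + aGetG (aGravity P V) i ax')).length)]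
      simp only [List.getElem_map, List.getElem_range, Option.getD_some]
      rw [getG_proj P i ax, getG_proj (aGravity P V) i ax]
      have hiG : i < (aGravity P V).length := by rw [length_gravity]; omega
      have a1 : (projP ax P).getD i 0 = P[i].getD ax 0 := by
        rw [List.getD_eq_getElem (projP ax P) 0 (by simpa [projP] using hiP)]
        simp [projP]
      have a2 : (projP ax (aGravity P V)).getD i 0 = (aGravity P V)[i].getD ax 0 := by
        rw [List.getD_eq_getElem (projP ax (aGravity P V)) 0 (by simpa [projP] using hiG)]
        simp [projP]
      linarith [a1, a2]
  · exact hvel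

-- ---- orbits ----

def aStates (P0 V0 : List (List Int)) (k : Nat) : List (List Int) × List (List Int) :=
  (fun s => aStep s.1 s.2)^[k] (P0, V0)

def bIter (s0 : List Int × List Int) (k : Nat) : List Int × List Int := bAxisStep^[k] s0

theorem bIter_succ (s0 : List Int × List Int) (k : Nat) :
    bIter s0 (k + 1) = bAxisStep (bIter s0 k) := Function.iterate_succ_apply' _ _ _

theorem states_inv (P0 V0 : List (List Int)) (hV0 : RowsOk V0) (hlen : V0.length = P0.length) :
    ∀ k, RowsOk (aStates P0 V0 k).2 ∧ (aStates P0 V0 k).2.length = (aStates P0 V0 k).1.length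
      ∧ (aStates P0 V0 k).1.length = P0.length := by
  intro k
  induction k with
  | zero => exact ⟨hV0, hlen, rfl⟩
  | succ k ih =>
      have hs : aStates P0 V0 (k + 1) = aStep (aStates P0 V0 k).1 (aStates P0 V0 k).2 :=
        Function.iterate_succ_apply' _ _ _
      refine ⟨?_, ?_, ?_⟩
      · rw [hs]; exact rowsOk_gravity _ _ ih.1
      · rw [hs]
        show (aGravity _ _).length = _
        rw [length_gravity, length_step_fst]
        rw [ih.2.1, ih.2.2]
      · rw [hs, length_step_fst, ih.2.2]

theorem states_proj (P0 V0 : List (List Int)) (ax : Nat)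
    (hV0 : RowsOk V0) (hlen : V0.length = P0.length) (hax : ax < 3) :
    ∀ k, (projP ax (aStates P0 V0 k).1, projP ax (aStates P0 V0 k).2)
      = bIter (projP ax P0, projP ax V0) k := by
  intro k
  induction k with
  | zero => rfl
  | succ k ih =>
      have hs : aStates P0 V0 (k + 1) = aStep (aStates P0 V0 k).1 (aStates P0 V0 k).2 :=
        Function.iterate_succ_apply' _ _ _
      have hinv := states_inv P0 V0 hV0 hlen k
      rw [hs, bIter_succ, ← ih, step_proj _ _ _ hinv.1 hinv.2.1 hax]

theorem bStep_lengths (s : List Int × List Int) (n : Nat)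
    (h1 : s.1.length = n) (h2 : s.2.length = n) :
    (bAxisStep s).1.length = n ∧ (bAxisStep s).2.length = n := by
  simp [bAxisStep, h1, h2]

theorem bIter_lengths (s0 : List Int × List Int) (n : Nat)
    (h1 : s0.1.length = n) (h2 : s0.2.length = n) :
    ∀ k, (bIter s0 k).1.length = n ∧ (bIter s0 k).2.length = n := by
  intro k
  induction k with
  | zero => exact ⟨h1, h2⟩
  | succ k ih => rw [bIter_succ]; exact bStep_lengths _ _ ih.1 ih.2

-- ---- the 1-D step is injective on same-length states ----

theorem bStep_snd_getElem (s : List Int × List Int) (n i : Nat)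
    (h1 : s.1.length = n) (h2 : s.2.length = n) (hi : i < n) :
    (bAxisStep s).2[i]'(by rw [(bStep_lengths s n h1 h2).2]; exact hi)
      = (s.2[i]'(by omega)) + (s.1.map (fun q => bSign (s.1[i]'(by omega)) q)).sum := by
  simp only [bAxisStep, List.getElem_map, List.getElem_zip]

theorem bStep_fst_getElem (s : List Int × List Int) (n i : Nat)
    (h1 : s.1.length = n) (h2 : s.2.length = n) (hi : i < n) :
    (bAxisStep s).1[i]'(by rw [(bStep_lengths s n h1 h2).1]; exact hi)
      = (s.1[i]'(by omega)) + ((bAxisStep s).2[i]'(by rw [(bStep_lengths s n h1 h2).2]; exact hi)) := by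
  simp only [bAxisStep, List.getElem_map, List.getElem_zip]

theorem bStep_inj (s t : List Int × List Int) (n : Nat)
    (hs1 : s.1.length = n) (hs2 : s.2.length = n)
    (ht1 : t.1.length = n) (ht2 : t.2.length = n)
    (heq : bAxisStep s = bAxisStep t) : s = t := by
  obtain ⟨ps, vs⟩ := s
  obtain ⟨pt, vt⟩ := t
  simp only [] at hs1 hs2 ht1 ht2
  have hps : ps = pt := by
    apply List.ext_getElem
    · rw [hs1, ht1]
    · intro i hi _
      have hi' : i < n := by omega
      have e1 := bStep_fst_getElem (ps, vs) n i hs1 hs2 hi'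
      have e2 := bStep_fst_getElem (pt, vt) n i ht1 ht2 hi'
      have e3 : (bAxisStep (ps, vs)).1[i]'(by rw [(bStep_lengths (ps, vs) n hs1 hs2).1]; exact hi')
          = (bAxisStep (pt, vt)).1[i]'(by rw [(bStep_lengths (pt, vt) n ht1 ht2).1]; exact hi') := by
        congr 1; rw [heq]
      have e4 : (bAxisStep (ps, vs)).2[i]'(by rw [(bStep_lengths (ps, vs) n hs1 hs2).2]; exact hi')
          = (bAxisStep (pt, vt)).2[i]'(by rw [(bStep_lengths (pt, vt) n ht1 ht2).2]; exact hi') := by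
        congr 1; rw [heq]
      rw [e1, e2, e4] at e3
      linarith [e3]
  subst hps
  have hvs : vs = vt := by
    apply List.ext_getElem
    · rw [hs2, ht2]
    · intro i hi _
      have hi' : i < n := by omega
      have e1 := bStep_snd_getElem (ps, vs) n i hs1 hs2 hi'
      have e2 := bStep_snd_getElem (ps, vt) n i ht1 ht2 hi'
      have e4 : (bAxisStep (ps, vs)).2[i]'(by rw [(bStep_lengths (ps, vs) n hs1 hs2).2]; exact hi')
          = (bAxisStep (ps, vt)).2[i]'(by rw [(bStep_lengths (ps, vt) n ht1 ht2).2]; exact hi') := by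
        congr 1; rw [heq]
      rw [e1, e2] at e4
      linarith [e4]
  rw [hvs]

-- ---- first repeat = first return to the initial state ----

theorem first_repeat (s0 : List Int × List Int) (n : Nat)
    (h1 : s0.1.length = n) (h2 : s0.2.length = n) (m : Nat) (hm : 1 ≤ m)
    (hmin : ∀ m', 1 ≤ m' → m' < m → ∀ j, j < m' → bIter s0 m' ≠ bIter s0 j)
    (j : Nat) (hj : j < m) (hrep : bIter s0 m = bIter s0 j) :
    bIter s0 m = s0 := by
  rcases Nat.eq_zero_or_pos j with rfl | hj1
  · exact hrep
  · exfalso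
    have hm2 : 2 ≤ m := by omega
    have hstep : bAxisStep (bIter s0 (m - 1)) = bAxisStep (bIter s0 (j - 1)) := by
      rw [← bIter_succ, ← bIter_succ, Nat.sub_add_cancel (by omega), Nat.sub_add_cancel (by omega)]
      exact hrep
    have hml := bIter_lengths s0 n h1 h2 (m - 1)
    have hjl := bIter_lengths s0 n h1 h2 (j - 1)
    have := bStep_inj _ _ n hml.1 hml.2 hjl.1 hjl.2 hstep
    exact hmin (m - 1) (by omega) (by omega) (j - 1) (by omega) this

-- ---- characterizing B's per-axis loop ----

theorem bLoop_none (s0 : List Int × List Int) :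
    ∀ (fuel k : Nat), (∀ m, 1 ≤ m → m ≤ k + fuel → bIter s0 m ≠ s0) →
      bAxisLoop s0 (bIter s0 k) (k : Int) fuel = none := by
  intro fuel
  induction fuel with
  | zero => intro k _; rfl
  | succ fuel ih =>
      intro k hno
      rw [bAxisLoop]
      rw [← bIter_succ]
      rw [if_neg (hno (k + 1) (by omega) (by omega))]
      have : (k : Int) + 1 = ((k + 1 : Nat) : Int) := by push_cast; ring
      rw [this]
      exact ih (k + 1) (fun m hm1 hm2 => hno m hm1 (by omega))

theorem bLoop_some (s0 : List Int × List Int) (c : Nat) (_hc1 : 1 ≤ c)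
    (hc : bIter s0 c = s0) (hmin : ∀ j, 1 ≤ j → j < c → bIter s0 j ≠ s0) :
    ∀ (fuel k : Nat), k < c → c ≤ k + fuel →
      bAxisLoop s0 (bIter s0 k) (k : Int) fuel = some (c : Int) := by
  intro fuel
  induction fuel with
  | zero => intro k h1 h2; omega
  | succ fuel ih =>
      intro k h1 h2
      rw [bAxisLoop]
      rw [← bIter_succ]
      rcases eq_or_ne (k + 1) c with he | hne
      · rw [if_pos (by rw [he]; exact hc)]
        rw [← he]
        norm_num
      · rw [if_neg (hmin (k + 1) (by omega) (by omega))]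
        have : (k : Int) + 1 = ((k + 1 : Nat) : Int) := by push_cast; ring
        rw [this]
        exact ih (k + 1) (by omega) (by omega)

-- ---- per-axis orbit of an input, and first-cycle predicates ----

def mV0 (moons : List (List Int)) : List (List Int) := moons.map (fun _ => [0, 0, 0])

def mS0 (moons : List (List Int)) (ax : Nat) : List Int × List Int :=
  (projP ax moons, projP ax (mV0 moons))

def mO (moons : List (List Int)) (ax k : Nat) : List Int × List Int := bIter (mS0 moons ax) k

def mH (moons : List (List Int)) (ax k : Nat) : List (Int × Int) :=
  (mO moons ax k).1.zip (mO moons ax k).2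

def FirstCyc (moons : List (List Int)) (ax c : Nat) : Prop :=
  1 ≤ c ∧ mO moons ax c = mO moons ax 0 ∧
    ∀ m, 1 ≤ m → m < c → mO moons ax m ≠ mO moons ax 0

def NoCycTo (moons : List (List Int)) (ax k : Nat) : Prop :=
  ∀ m, 1 ≤ m → m ≤ k → mO moons ax m ≠ mO moons ax 0

def FoundBy (moons : List (List Int)) (ax k : Nat) : Prop :=
  ∃ c, FirstCyc moons ax c ∧ c ≤ k

def CVal (moons : List (List Int)) (ax k : Nat) (c : Option Int) : Prop :=
  (c = none ∧ NoCycTo moons ax k) ∨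
    ∃ c' : Nat, c = some (c' : Int) ∧ FirstCyc moons ax c' ∧ c' ≤ k

def SetInv (moons : List (List Int)) (ax k : Nat) (s : PySem.Set (List (Int × Int))) : Prop :=
  ∀ x, x ∈ s ↔ ∃ j, j ≤ k ∧ x = mH moons ax j

def LoopInv (moons : List (List Int)) (k : Nat)
    (sets : List (PySem.Set (List (Int × Int)))) (cycles : List (Option Int)) : Prop :=
  sets.length = 3 ∧ cycles.length = 3 ∧ ∀ ax, ax < 3 →
    SetInv moons ax k (sets.getD ax (PySem.Set.ofList [])) ∧
    CVal moons ax k (cycles.getD ax none)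

def AllFoundBy (moons : List (List Int)) (k : Nat) : Prop := ∀ ax, ax < 3 → FoundBy moons ax k

theorem rowsOk_mV0 (moons : List (List Int)) : RowsOk (mV0 moons) := by
  intro row hrow
  simp only [mV0, List.mem_map] at hrow
  obtain ⟨_, _, rfl⟩ := hrow
  decide

theorem length_mV0 (moons : List (List Int)) : (mV0 moons).length = moons.length := by
  simp [mV0]

theorem mO_len (moons : List (List Int)) (ax k : Nat) :
    (mO moons ax k).1.length = moons.length ∧ (mO moons ax k).2.length = moons.length := by
  exact bIter_lengths _ _ (by simp [mS0, length_projP]) (by simp [mS0, projP, mV0]) k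

theorem mH_inj (moons : List (List Int)) (ax j k : Nat) :
    mH moons ax k = mH moons ax j ↔ mO moons ax k = mO moons ax j := by
  constructor
  · intro h
    have h' := congrArg List.unzip h
    rw [mH, mH, List.unzip_zip (by rw [(mO_len moons ax k).1, (mO_len moons ax k).2]),
      List.unzip_zip (by rw [(mO_len moons ax j).1, (mO_len moons ax j).2])] at h'
    exact h'
  · intro h; rw [mH, mH, h]

theorem aHash_eq_zip (P V : List (List Int)) (ax : Nat) (h : V.length = P.length) :
    aHash ax P V = (projP ax P).zip (projP ax V) := by
  apply List.ext_getElem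
  · simp [aHash, projP, h]
  · intro i h1 h2
    have hiP : i < P.length := by simpa [aHash] using h1
    simp only [aHash, List.getElem_map, List.getElem_range, List.getElem_zip]
    rw [getG_proj P i ax, getG_proj V i ax,
      List.getD_eq_getElem (projP ax P) 0 (by simpa [projP] using hiP),
      List.getD_eq_getElem (projP ax V) 0 (by simp [projP, h]; omega)]

theorem hash_states (moons : List (List Int)) (ax k : Nat) (hax : ax < 3) :
    aHash ax (aStates moons (mV0 moons) k).1 (aStates moons (mV0 moons) k).2 = mH moons ax k := by
  have hinv := states_inv moons (mV0 moons) (rowsOk_mV0 moons) (length_mV0 moons) k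
  rw [aHash_eq_zip _ _ _ (by rw [hinv.2.1])]
  have hp := states_proj moons (mV0 moons) ax (rowsOk_mV0 moons) (length_mV0 moons) hax k
  rw [mH, mO, mS0, ← hp]

-- if no first-return up to k, there is no repeat of any kind up to k
theorem noQ_of_noCyc (moons : List (List Int)) (ax k : Nat) (hno : NoCycTo moons ax k) :
    ∀ m, 1 ≤ m → m ≤ k → ∀ j, j < m → mO moons ax m ≠ mO moons ax j := by
  intro m
  induction m using Nat.strong_induction_on with
  | _ m IH =>
    intro hm1 hmk j hj heq
    have hfr := first_repeat (mS0 moons ax) moons.length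
      (by simp [mS0, length_projP]) (by simp [mS0, projP, mV0]) m hm1
      (fun m' h1 h2 j' hj' => IH m' h2 h1 (by omega) j' hj') j hj heq
    exact hno m hm1 hmk hfr

theorem least_cyc (moons : List (List Int)) (ax K : Nat)
    (h : ∃ m, 1 ≤ m ∧ m ≤ K ∧ mO moons ax m = mO moons ax 0) : FoundBy moons ax K := by
  have h' : ∃ m, 1 ≤ m ∧ mO moons ax m = mO moons ax 0 := by
    obtain ⟨m, h1, _, h3⟩ := h
    exact ⟨m, h1, h3⟩
  refine ⟨Nat.find h', ⟨(Nat.find_spec h').1, (Nat.find_spec h').2, ?_⟩, ?_⟩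
  · intro m hm1 hmlt heq
    exact Nat.find_min h' hmlt ⟨hm1, heq⟩
  · obtain ⟨m, h1, h2, h3⟩ := h
    exact le_trans (Nat.find_min' h' ⟨h1, h3⟩) h2

theorem firstCyc_unique (moons : List (List Int)) (ax c c' : Nat)
    (h : FirstCyc moons ax c) (h' : FirstCyc moons ax c') : c = c' := by
  by_contra hne
  rcases Nat.lt_or_ge c c' with hlt | hge
  · exact h'.2.2 c h.1 hlt h.2.1
  · exact h.2.2 c' h'.1 (by omega) h'.2.1

theorem cval_none_not_found (moons : List (List Int)) (ax k : Nat) (c : Option Int)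
    (h : CVal moons ax k c) (hc : c = none) : ¬ FoundBy moons ax k := by
  rintro ⟨c', hfc, hle⟩
  rcases h with ⟨_, hno⟩ | ⟨c'', hsome, _, _⟩
  · exact hno c' hfc.1 hle hfc.2.1
  · rw [hc] at hsome; simp at hsome

theorem cval_some_found (moons : List (List Int)) (ax k : Nat) (c : Option Int)
    (h : CVal moons ax k c) (hc : c ≠ none) :
    ∃ c' : Nat, c = some (c' : Int) ∧ FirstCyc moons ax c' ∧ c' ≤ k := by
  rcases h with ⟨hnone, _⟩ | hs
  · exact absurd hnone hc
  · exact hs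

-- ---- processing one axis at step k+1 ----

theorem axProc_mem (moons : List (List Int)) (ax k : Nat)
    (s : PySem.Set (List (Int × Int))) (hs : SetInv moons ax k s) :
    SetInv moons ax (k + 1) (PySem.Set.add s (mH moons ax (k + 1))) := by
  intro x
  rw [PySem.Set.mem_add]
  constructor
  · rintro h
    rcases h with h | h
    · obtain ⟨j, hj, hx⟩ := (hs x).mp h
      exact ⟨j, by omega, hx⟩
    · exact ⟨k + 1, le_refl _, h⟩
  · rintro ⟨j, hj, hx⟩
    rcases eq_or_ne j (k + 1) with rfl | hne
    · exact Or.inr hx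
    · exact Or.inl ((hs x).mpr ⟨j, by omega, hx⟩)

theorem axProc_contains (moons : List (List Int)) (ax k : Nat)
    (s : PySem.Set (List (Int × Int))) (hs : SetInv moons ax k s) :
    (PySem.Set.contains s (mH moons ax (k + 1)) = true)
      ↔ ∃ j, j ≤ k ∧ mO moons ax (k + 1) = mO moons ax j := by
  rw [show (PySem.Set.contains s (mH moons ax (k + 1)) = true) ↔ mH moons ax (k + 1) ∈ s from
    by simp [PySem.Set.contains]]
  rw [hs (mH moons ax (k + 1))]
  constructor
  · rintro ⟨j, hj, hx⟩
    exact ⟨j, hj, (mH_inj moons ax j (k + 1)).mp hx⟩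
  · rintro ⟨j, hj, hx⟩
    exact ⟨j, hj, (mH_inj moons ax j (k + 1)).mpr hx⟩

theorem axProc_cval (moons : List (List Int)) (ax k : Nat) (c : Option Int)
    (hc : CVal moons ax k c) (mem : Bool)
    (hmem : mem = true ↔ ∃ j, j ≤ k ∧ mO moons ax (k + 1) = mO moons ax j) :
    CVal moons ax (k + 1) (if mem then some (c.getD ((k + 1 : Nat) : Int)) else c) := by
  cases hb : mem with
  | false =>
    rw [if_neg (by decide)]
    have hnotQ := (not_iff_not.mpr hmem).mp (by simp [hb])
    rcases hc with ⟨hnone, hno⟩ | ⟨c', hsome, hfc, hle⟩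
    · refine Or.inl ⟨hnone, ?_⟩
      intro m hm1 hmk heq
      rcases Nat.lt_or_ge m (k + 1) with hlt | hge
      · exact hno m hm1 (by omega) heq
      · have : m = k + 1 := by omega
        subst this
        exact hnotQ ⟨0, by omega, heq⟩
    · exact Or.inr ⟨c', hsome, hfc, by omega⟩
  | true =>
    rw [if_pos (by decide)]
    have hQ := hmem.mp hb
    rcases hc with ⟨hnone, hno⟩ | ⟨c', hsome, hfc, hle⟩
    · subst hnone
      obtain ⟨j, hj, heq⟩ := hQ
      have hcyc : mO moons ax (k + 1) = mO moons ax 0 := by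
        apply first_repeat (mS0 moons ax) moons.length
          (by simp [mS0, length_projP]) (by simp [mS0, projP, mV0]) (k + 1) (by omega)
          (fun m' h1 h2 j' hj' => noQ_of_noCyc moons ax k hno m' h1 (by omega) j' hj')
          j (by omega) heq
      refine Or.inr ⟨k + 1, by simp, ⟨by omega, hcyc, ?_⟩, le_refl _⟩
      intro m hm1 hmlt
      exact hno m hm1 (by omega)
    · subst hsome
      exact Or.inr ⟨c', by simp, hfc, by omega⟩

-- ---- unfolding equations and small list facts for the axis pass ----

theorem aAxLoop_cons (P V : List (List Int)) (step : Int) (ax : Nat) (rest : List Nat)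
    (sets : List (PySem.Set (List (Int × Int)))) (cycles : List (Option Int)) :
    aAxLoop P V step (ax :: rest) sets cycles =
      (if (if PySem.Set.contains (sets.getD ax (PySem.Set.ofList [])) (aHash ax P V) then
              cycles.set ax (some ((cycles.getD ax none).getD step)) else cycles).contains none
       then aAxLoop P V step rest
              (sets.set ax (PySem.Set.add (sets.getD ax (PySem.Set.ofList [])) (aHash ax P V)))
              (if PySem.Set.contains (sets.getD ax (PySem.Set.ofList [])) (aHash ax P V) then
                cycles.set ax (some ((cycles.getD ax none).getD step)) else cycles)
       else Sum.inl (if PySem.Set.contains (sets.getD ax (PySem.Set.ofList [])) (aHash ax P V) then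
                cycles.set ax (some ((cycles.getD ax none).getD step)) else cycles)) := rfl

theorem aAxLoop_nil (P V : List (List Int)) (step : Int)
    (sets : List (PySem.Set (List (Int × Int)))) (cycles : List (Option Int)) :
    aAxLoop P V step [] sets cycles = Sum.inr (sets, cycles) := rfl

theorem contains_none_0 (y z : Option Int) : ([none, y, z].contains none) = true := by
  rw [List.contains_iff_mem]; simp

theorem contains_none_1 (x z : Option Int) : ([x, none, z].contains none) = true := by
  rw [List.contains_iff_mem]; simp

theorem contains_none_2 (x y : Option Int) : ([x, y, none].contains none) = true := by
  rw [List.contains_iff_mem]; simp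

theorem contains_none_false (a b c : Int) :
    ([some a, some b, some c].contains none) = false := by
  rw [← Bool.not_eq_true, List.contains_iff_mem]; simp

theorem foundBy_mono (moons : List (List Int)) (ax k k' : Nat)
    (h : FoundBy moons ax k) (hk : k ≤ k') : FoundBy moons ax k' := by
  obtain ⟨c, hc, hle⟩ := h
  exact ⟨c, hc, by omega⟩

-- ---- one full pass over the three axes at step k+1 ----

theorem axLoop3 (moons : List (List Int)) (k : Nat)
    (sets : List (PySem.Set (List (Int × Int)))) (cycles : List (Option Int))
    (hI : LoopInv moons k sets cycles) :
    (AllFoundBy moons (k + 1) →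
      ∃ c0 c1 c2 : Nat, FirstCyc moons 0 c0 ∧ FirstCyc moons 1 c1 ∧ FirstCyc moons 2 c2 ∧
        aAxLoop (aStates moons (mV0 moons) (k + 1)).1 (aStates moons (mV0 moons) (k + 1)).2
            ((k + 1 : Nat) : Int) (List.range 3) sets cycles
          = Sum.inl [some (c0 : Int), some (c1 : Int), some (c2 : Int)]) ∧
    (¬ AllFoundBy moons (k + 1) →
      ∃ sets' cycles',
        aAxLoop (aStates moons (mV0 moons) (k + 1)).1 (aStates moons (mV0 moons) (k + 1)).2
            ((k + 1 : Nat) : Int) (List.range 3) sets cycles = Sum.inr (sets', cycles')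
          ∧ LoopInv moons (k + 1) sets' cycles') := by
  obtain ⟨hsl, hcl, haxI⟩ := hI
  obtain ⟨S0, S1, S2, rfl⟩ := List.length_eq_three.mp hsl
  obtain ⟨C0, C1, C2, rfl⟩ := List.length_eq_three.mp hcl
  have h0 := haxI 0 (by omega)
  have h1 := haxI 1 (by omega)
  have h2 := haxI 2 (by omega)
  simp only [List.getD_cons_zero, List.getD_cons_succ] at h0 h1 h2
  have hh0 : aHash 0 (aStates moons (mV0 moons) (k + 1)).1 (aStates moons (mV0 moons) (k + 1)).2
      = mH moons 0 (k + 1) := hash_states moons 0 (k + 1) (by omega)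
  have hh1 : aHash 1 (aStates moons (mV0 moons) (k + 1)).1 (aStates moons (mV0 moons) (k + 1)).2
      = mH moons 1 (k + 1) := hash_states moons 1 (k + 1) (by omega)
  have hh2 : aHash 2 (aStates moons (mV0 moons) (k + 1)).1 (aStates moons (mV0 moons) (k + 1)).2
      = mH moons 2 (k + 1) := hash_states moons 2 (k + 1) (by omega)
  have hS0' := axProc_mem moons 0 k S0 h0.1
  have hS1' := axProc_mem moons 1 k S1 h1.1
  have hS2' := axProc_mem moons 2 k S2 h2.1
  rw [show List.range 3 = [0, 1, 2] from by decide, aAxLoop_cons]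
  simp only [List.getD_cons_zero, List.set, hh0]
  obtain ⟨c0', hc0'⟩ : ∃ c, (if PySem.Set.contains S0 (mH moons 0 (k + 1)) then
      some (C0.getD ((k + 1 : Nat) : Int)) else C0) = c := ⟨_, rfl⟩
  have hcv0 : CVal moons 0 (k + 1) c0' :=
    hc0' ▸ axProc_cval moons 0 k C0 h0.2 _ (axProc_contains moons 0 k S0 h0.1)
  rw [show (if PySem.Set.contains S0 (mH moons 0 (k + 1)) then
      [some (C0.getD ((k + 1 : Nat) : Int)), C1, C2] else [C0, C1, C2]) = [c0', C1, C2] from by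
    rw [← hc0']; cases PySem.Set.contains S0 (mH moons 0 (k + 1)) <;> rfl]
  rcases hE0 : c0' with _ | v0
  · -- axis 0 not yet cyclic: the pass surely ends in Sum.inr
    subst hE0
    rw [if_pos (contains_none_0 C1 C2), aAxLoop_cons]
    simp only [List.getD_cons_zero, List.getD_cons_succ, List.set, hh1]
    obtain ⟨c1', hc1'⟩ : ∃ c, (if PySem.Set.contains S1 (mH moons 1 (k + 1)) then
        some (C1.getD ((k + 1 : Nat) : Int)) else C1) = c := ⟨_, rfl⟩
    have hcv1 : CVal moons 1 (k + 1) c1' :=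
      hc1' ▸ axProc_cval moons 1 k C1 h1.2 _ (axProc_contains moons 1 k S1 h1.1)
    rw [show (if PySem.Set.contains S1 (mH moons 1 (k + 1)) then
        [(none : Option Int), some (C1.getD ((k + 1 : Nat) : Int)), C2] else [none, C1, C2])
        = [none, c1', C2] from by
      rw [← hc1']; cases PySem.Set.contains S1 (mH moons 1 (k + 1)) <;> rfl]
    rw [if_pos (contains_none_0 c1' C2), aAxLoop_cons]
    simp only [List.getD_cons_zero, List.getD_cons_succ, List.set, hh2]
    obtain ⟨c2', hc2'⟩ : ∃ c, (if PySem.Set.contains S2 (mH moons 2 (k + 1)) then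
        some (C2.getD ((k + 1 : Nat) : Int)) else C2) = c := ⟨_, rfl⟩
    have hcv2 : CVal moons 2 (k + 1) c2' :=
      hc2' ▸ axProc_cval moons 2 k C2 h2.2 _ (axProc_contains moons 2 k S2 h2.1)
    rw [show (if PySem.Set.contains S2 (mH moons 2 (k + 1)) then
        [(none : Option Int), c1', some (C2.getD ((k + 1 : Nat) : Int))] else [none, c1', C2])
        = [none, c1', c2'] from by
      rw [← hc2']; cases PySem.Set.contains S2 (mH moons 2 (k + 1)) <;> rfl]
    rw [if_pos (contains_none_0 c1' c2'), aAxLoop_nil]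
    have hnotF0 : ¬ FoundBy moons 0 (k + 1) := cval_none_not_found moons 0 (k + 1) none hcv0 rfl
    constructor
    · intro hAF
      exact absurd (hAF 0 (by omega)) hnotF0
    · intro _
      refine ⟨_, _, rfl, by simp, by simp, ?_⟩
      intro ax hax3
      interval_cases ax
      · exact ⟨by simpa using hS0', by simpa using hcv0⟩
      · exact ⟨by simpa using hS1', by simpa using hcv1⟩
      · exact ⟨by simpa using hS2', by simpa using hcv2⟩
  · -- axis 0 cyclic by k+1
    obtain ⟨n0, hn0eq, hn0fc, hn0le⟩ := cval_some_found moons 0 (k + 1) c0' hcv0 (by rw [hE0]; simp)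
    rw [← hE0]
    rcases hC1 : C1 with _ | v1
    · -- axis 1 had no cycle by k: process axis 1
      rw [if_pos (by rw [hE0]; exact contains_none_1 (some v0) C2), aAxLoop_cons]
      simp only [List.getD_cons_zero, List.getD_cons_succ, List.set, hh1]
      obtain ⟨c1', hc1'⟩ : ∃ c, (if PySem.Set.contains S1 (mH moons 1 (k + 1)) then
          some ((none : Option Int).getD ((k + 1 : Nat) : Int)) else none) = c := ⟨_, rfl⟩
      have hcv1 : CVal moons 1 (k + 1) c1' := by
        rw [← hc1']
        exact axProc_cval moons 1 k none (hC1 ▸ h1.2) _ (axProc_contains moons 1 k S1 h1.1)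
      rw [show (if PySem.Set.contains S1 (mH moons 1 (k + 1)) then
          [c0', some ((none : Option Int).getD ((k + 1 : Nat) : Int)), C2] else [c0', none, C2])
          = [c0', c1', C2] from by
        rw [← hc1']; cases PySem.Set.contains S1 (mH moons 1 (k + 1)) <;> rfl]
      rcases hE1 : c1' with _ | v1'
      · -- still none: ends in Sum.inr
        rw [← hE1]
        rw [if_pos (by rw [hE1]; exact contains_none_1 c0' C2), aAxLoop_cons]
        simp only [List.getD_cons_zero, List.getD_cons_succ, List.set, hh2]
        obtain ⟨c2', hc2'⟩ : ∃ c, (if PySem.Set.contains S2 (mH moons 2 (k + 1)) then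
            some (C2.getD ((k + 1 : Nat) : Int)) else C2) = c := ⟨_, rfl⟩
        have hcv2 : CVal moons 2 (k + 1) c2' :=
          hc2' ▸ axProc_cval moons 2 k C2 h2.2 _ (axProc_contains moons 2 k S2 h2.1)
        rw [show (if PySem.Set.contains S2 (mH moons 2 (k + 1)) then
            [c0', c1', some (C2.getD ((k + 1 : Nat) : Int))] else [c0', c1', C2])
            = [c0', c1', c2'] from by
          rw [← hc2']; cases PySem.Set.contains S2 (mH moons 2 (k + 1)) <;> rfl]
        rw [if_pos (by rw [hE1]; exact contains_none_1 c0' c2'), aAxLoop_nil]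
        have hnotF1 : ¬ FoundBy moons 1 (k + 1) :=
          cval_none_not_found moons 1 (k + 1) c1' hcv1 hE1
        constructor
        · intro hAF
          exact absurd (hAF 1 (by omega)) hnotF1
        · intro _
          refine ⟨_, _, rfl, by simp, by simp, ?_⟩
          intro ax hax3
          interval_cases ax
          · exact ⟨by simpa using hS0', by simpa using hcv0⟩
          · exact ⟨by simpa using hS1', by simpa using hcv1⟩
          · exact ⟨by simpa using hS2', by simpa using hcv2⟩
      · -- axis 1 found at step k+1
        obtain ⟨n1, hn1eq, hn1fc, hn1le⟩ :=
          cval_some_found moons 1 (k + 1) c1' hcv1 (by rw [hE1]; simp)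
        rw [← hE1]
        rcases hC2 : C2 with _ | v2
        · -- axis 2 had no cycle by k: process axis 2
          rw [if_pos (contains_none_2 c0' c1'), aAxLoop_cons]
          simp only [List.getD_cons_zero, List.getD_cons_succ, List.set, hh2]
          obtain ⟨c2', hc2'⟩ : ∃ c, (if PySem.Set.contains S2 (mH moons 2 (k + 1)) then
              some ((none : Option Int).getD ((k + 1 : Nat) : Int)) else none) = c := ⟨_, rfl⟩
          have hcv2 : CVal moons 2 (k + 1) c2' := by
            rw [← hc2']
            exact axProc_cval moons 2 k none (hC2 ▸ h2.2) _ (axProc_contains moons 2 k S2 h2.1)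
          rw [show (if PySem.Set.contains S2 (mH moons 2 (k + 1)) then
              [c0', c1', some ((none : Option Int).getD ((k + 1 : Nat) : Int))] else [c0', c1', none])
              = [c0', c1', c2'] from by
            rw [← hc2']; cases PySem.Set.contains S2 (mH moons 2 (k + 1)) <;> rfl]
          rcases hE2 : c2' with _ | v2'
          · rw [← hE2]
            rw [if_pos (by rw [hE2]; exact contains_none_2 c0' c1'), aAxLoop_nil]
            have hnotF2 : ¬ FoundBy moons 2 (k + 1) :=
              cval_none_not_found moons 2 (k + 1) c2' hcv2 hE2
            constructor
            · intro hAF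
              exact absurd (hAF 2 (by omega)) hnotF2
            · intro _
              refine ⟨_, _, rfl, by simp, by simp, ?_⟩
              intro ax hax3
              interval_cases ax
              · exact ⟨by simpa using hS0', by simpa using hcv0⟩
              · exact ⟨by simpa using hS1', by simpa using hcv1⟩
              · exact ⟨by simpa using hS2', by simpa using hcv2⟩
          · -- all three cyclic: exit after axis 2
            obtain ⟨n2, hn2eq, hn2fc, hn2le⟩ :=
              cval_some_found moons 2 (k + 1) c2' hcv2 (by rw [hE2]; simp)
            rw [← hE2]
            constructor
            · intro _
              refine ⟨n0, n1, n2, hn0fc, hn1fc, hn2fc, ?_⟩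
              rw [hn0eq, hn1eq, hn2eq, if_neg (by rw [contains_none_false]; simp)]
            · intro hnAF
              exfalso
              apply hnAF
              intro ax hax3
              interval_cases ax
              · exact ⟨n0, hn0fc, hn0le⟩
              · exact ⟨n1, hn1fc, hn1le⟩
              · exact ⟨n2, hn2fc, hn2le⟩
        · -- axis 2 already cyclic at k: exit after axis 1
          obtain ⟨n2, hn2eq, hn2fc, hn2le⟩ :=
            cval_some_found moons 2 k (some v2) (hC2 ▸ h2.2) (by simp)
          constructor
          · intro _
            refine ⟨n0, n1, n2, hn0fc, hn1fc, hn2fc, ?_⟩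
            rw [hn0eq, hn1eq, hn2eq, if_neg (by rw [contains_none_false]; simp)]
          · intro hnAF
            exfalso
            apply hnAF
            intro ax hax3
            interval_cases ax
            · exact ⟨n0, hn0fc, hn0le⟩
            · exact ⟨n1, hn1fc, hn1le⟩
            · exact ⟨n2, hn2fc, by omega⟩
    · -- axis 1 already cyclic at k
      obtain ⟨n1, hn1eq, hn1fc, hn1le⟩ :=
        cval_some_found moons 1 k (some v1) (hC1 ▸ h1.2) (by simp)
      rcases hC2 : C2 with _ | v2
      · -- axis 2 not yet: continue, process axes 1 and 2
        rw [if_pos (contains_none_2 c0' (some v1)), aAxLoop_cons]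
        simp only [List.getD_cons_zero, List.getD_cons_succ, List.set, hh1]
        rw [show (if PySem.Set.contains S1 (mH moons 1 (k + 1)) then
            [c0', some ((some v1).getD ((k + 1 : Nat) : Int)), none] else [c0', some v1, none])
            = [c0', some v1, (none : Option Int)] from by
          cases PySem.Set.contains S1 (mH moons 1 (k + 1)) <;> rfl]
        rw [if_pos (contains_none_2 c0' (some v1)), aAxLoop_cons]
        simp only [List.getD_cons_zero, List.getD_cons_succ, List.set, hh2]
        obtain ⟨c2', hc2'⟩ : ∃ c, (if PySem.Set.contains S2 (mH moons 2 (k + 1)) then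
            some ((none : Option Int).getD ((k + 1 : Nat) : Int)) else none) = c := ⟨_, rfl⟩
        have hcv2 : CVal moons 2 (k + 1) c2' := by
          rw [← hc2']
          exact axProc_cval moons 2 k none (hC2 ▸ h2.2) _ (axProc_contains moons 2 k S2 h2.1)
        rw [show (if PySem.Set.contains S2 (mH moons 2 (k + 1)) then
            [c0', some v1, some ((none : Option Int).getD ((k + 1 : Nat) : Int))] else [c0', some v1, none])
            = [c0', some v1, c2'] from by
          rw [← hc2']; cases PySem.Set.contains S2 (mH moons 2 (k + 1)) <;> rfl]
        rcases hE2 : c2' with _ | v2'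
        · rw [← hE2]
          rw [if_pos (by rw [hE2]; exact contains_none_2 c0' (some v1)), aAxLoop_nil]
          have hnotF2 : ¬ FoundBy moons 2 (k + 1) :=
            cval_none_not_found moons 2 (k + 1) c2' hcv2 hE2
          constructor
          · intro hAF
            exact absurd (hAF 2 (by omega)) hnotF2
          · intro _
            refine ⟨_, _, rfl, by simp, by simp, ?_⟩
            intro ax hax3
            interval_cases ax
            · exact ⟨by simpa using hS0', by simpa using hcv0⟩
            · refine ⟨by simpa using hS1', ?_⟩
              simp only [List.getD_cons_zero, List.getD_cons_succ]
              exact Or.inr ⟨n1, hn1eq, hn1fc, by omega⟩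
            · exact ⟨by simpa using hS2', by simpa using hcv2⟩
        · obtain ⟨n2, hn2eq, hn2fc, hn2le⟩ :=
            cval_some_found moons 2 (k + 1) c2' hcv2 (by rw [hE2]; simp)
          rw [← hE2]
          constructor
          · intro _
            refine ⟨n0, n1, n2, hn0fc, hn1fc, hn2fc, ?_⟩
            rw [hn0eq, hn1eq, hn2eq, if_neg (by rw [contains_none_false]; simp)]
          · intro hnAF
            exfalso
            apply hnAF
            intro ax hax3
            interval_cases ax
            · exact ⟨n0, hn0fc, hn0le⟩
            · exact ⟨n1, hn1fc, by omega⟩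
            · exact ⟨n2, hn2fc, hn2le⟩
      · -- axes 1 and 2 already cyclic: exit right after axis 0
        obtain ⟨n2, hn2eq, hn2fc, hn2le⟩ :=
          cval_some_found moons 2 k (some v2) (hC2 ▸ h2.2) (by simp)
        constructor
        · intro _
          refine ⟨n0, n1, n2, hn0fc, hn1fc, hn2fc, ?_⟩
          rw [hn0eq, hn1eq, hn2eq, if_neg (by rw [contains_none_false]; simp)]
        · intro hnAF
          exfalso
          apply hnAF
          intro ax hax3
          interval_cases ax
          · exact ⟨n0, hn0fc, hn0le⟩
          · exact ⟨n1, hn1fc, by omega⟩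
          · exact ⟨n2, hn2fc, by omega⟩

-- ---- the full A loop ----

theorem aLoop_succ (fuel : Nat) (P V : List (List Int))
    (sets : List (PySem.Set (List (Int × Int)))) (cycles : List (Option Int)) (step : Int) :
    aLoop (fuel + 1) P V sets cycles step =
      (match aAxLoop (aStep P V).1 (aStep P V).2 step (List.range 3) sets cycles with
       | Sum.inl res => some res
       | Sum.inr sc => aLoop fuel (aStep P V).1 (aStep P V).2 sc.1 sc.2 (step + 1)) := rfl

theorem aStep_states (moons : List (List Int)) (k : Nat) :
    aStep (aStates moons (mV0 moons) k).1 (aStates moons (mV0 moons) k).2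
      = aStates moons (mV0 moons) (k + 1) :=
  (Function.iterate_succ_apply' (fun s => aStep s.1 s.2) k (moons, mV0 moons)).symm

theorem aLoop_char (moons : List (List Int)) : ∀ (fuel : Nat), ∀ (k : Nat),
    ∀ (sets : List (PySem.Set (List (Int × Int)))) (cycles : List (Option Int)),
    LoopInv moons k sets cycles → ¬ AllFoundBy moons k →
    (AllFoundBy moons (k + fuel) →
      ∃ c0 c1 c2 : Nat, FirstCyc moons 0 c0 ∧ FirstCyc moons 1 c1 ∧ FirstCyc moons 2 c2 ∧
        aLoop fuel (aStates moons (mV0 moons) k).1 (aStates moons (mV0 moons) k).2 sets cycles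
            ((k + 1 : Nat) : Int)
          = some [some (c0 : Int), some (c1 : Int), some (c2 : Int)]) ∧
    (¬ AllFoundBy moons (k + fuel) →
      aLoop fuel (aStates moons (mV0 moons) k).1 (aStates moons (mV0 moons) k).2 sets cycles
          ((k + 1 : Nat) : Int) = none) := by
  intro fuel
  induction fuel with
  | zero =>
      intro k sets cycles hI hnot
      constructor
      · intro hAF
        rw [Nat.add_zero] at hAF
        exact absurd hAF hnot
      · intro _
        rfl
  | succ fuel ih =>
      intro k sets cycles hI hnot
      have hax3 := axLoop3 moons k sets cycles hI
      by_cases hAF : AllFoundBy moons (k + 1)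
      · obtain ⟨c0, c1, c2, f0, f1, f2, heq⟩ := hax3.1 hAF
        constructor
        · intro _
          refine ⟨c0, c1, c2, f0, f1, f2, ?_⟩
          rw [aLoop_succ, aStep_states, heq]
        · intro hn
          exfalso
          exact hn (fun ax h3 => foundBy_mono moons ax (k + 1) (k + (fuel + 1)) (hAF ax h3) (by omega))
      · obtain ⟨sets', cycles', heq, hI'⟩ := hax3.2 hAF
        have ihk := ih (k + 1) sets' cycles' hI' hAF
        have hcast : ((k + 1 : Nat) : Int) + 1 = ((k + 1 + 1 : Nat) : Int) := by push_cast; ring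
        have hrw : aLoop (fuel + 1) (aStates moons (mV0 moons) k).1 (aStates moons (mV0 moons) k).2
            sets cycles ((k + 1 : Nat) : Int)
            = aLoop fuel (aStates moons (mV0 moons) (k + 1)).1 (aStates moons (mV0 moons) (k + 1)).2
                sets' cycles' ((k + 1 + 1 : Nat) : Int) := by
          rw [aLoop_succ, aStep_states, heq, hcast]
        constructor
        · intro hAF2
          have hAF2' : AllFoundBy moons ((k + 1) + fuel) := by
            intro ax h3
            exact foundBy_mono moons ax (k + (fuel + 1)) ((k + 1) + fuel) (hAF2 ax h3) (by omega)
          obtain ⟨c0, c1, c2, f0, f1, f2, heq2⟩ := ihk.1 hAF2'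
          exact ⟨c0, c1, c2, f0, f1, f2, by rw [hrw, heq2]⟩
        · intro hn
          have hn' : ¬ AllFoundBy moons ((k + 1) + fuel) := by
            intro hAF2
            exact hn (fun ax h3 => foundBy_mono moons ax ((k + 1) + fuel) (k + (fuel + 1)) (hAF2 ax h3) (by omega))
          rw [hrw, ihk.2 hn']

-- ---- B's per-axis function in terms of FirstCyc ----

theorem projP_mV0 (moons : List (List Int)) (ax : Nat) (hax : ax < 3) :
    projP ax (mV0 moons) = List.replicate moons.length 0 := by
  apply List.ext_getElem
  · simp [projP, mV0]
  · intro i h1 h2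
    simp only [projP, mV0, List.getElem_map, List.getElem_replicate]
    interval_cases ax <;> rfl

theorem bAxis_some (moons : List (List Int)) (ax : Nat) (hax : ax < 3) (c : Nat)
    (hfc : FirstCyc moons ax c) (hle : c ≤ pvFuel) :
    bAxisCycleLength (moons.map (fun moon => moon.getD ax 0)) = some (c : Int) := by
  unfold bAxisCycleLength
  have hps : (moons.map (fun moon => moon.getD ax 0)) = projP ax moons := rfl
  have h2 : List.replicate (projP ax moons).length (0 : Int)
      = projP ax (mV0 moons) := by
    rw [length_projP, projP_mV0 moons ax hax]
  rw [hps, h2]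
  have hsome := bLoop_some (mS0 moons ax) c hfc.1 hfc.2.1
    (fun j h1 h2 => hfc.2.2 j h1 h2) pvFuel 0 (by have := hfc.1; omega) (by omega)
  simpa using hsome

theorem bAxis_none (moons : List (List Int)) (ax : Nat) (hax : ax < 3)
    (hnf : ¬ FoundBy moons ax pvFuel) :
    bAxisCycleLength (moons.map (fun moon => moon.getD ax 0)) = none := by
  unfold bAxisCycleLength
  have hps : (moons.map (fun moon => moon.getD ax 0)) = projP ax moons := rfl
  have h2 : List.replicate (projP ax moons).length (0 : Int)
      = projP ax (mV0 moons) := by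
    rw [length_projP, projP_mV0 moons ax hax]
  rw [hps, h2]
  have hno : ∀ m, 1 ≤ m → m ≤ 0 + pvFuel → bIter (mS0 moons ax) m ≠ mS0 moons ax := by
    intro m h1 h2 heq
    exact hnf (least_cyc moons ax pvFuel ⟨m, h1, by omega, heq⟩)
  have := bLoop_none (mS0 moons ax) pvFuel 0 hno
  simpa using this

-- ---- assembling both programs ----

theorem ports_agree (moons : List (List Int)) :
    solution_for_second_task moons = solution_for_second_task_alt moons := by
  unfold solution_for_second_task solution_for_second_task_alt
  rw [show List.range 3 = [0, 1, 2] from by decide]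
  simp only [List.map_cons, List.map_nil]
  have hI0 : LoopInv moons 0
      [PySem.Set.ofList [aHash 0 moons (moons.map (fun _ => [0, 0, 0]))],
       PySem.Set.ofList [aHash 1 moons (moons.map (fun _ => [0, 0, 0]))],
       PySem.Set.ofList [aHash 2 moons (moons.map (fun _ => [0, 0, 0]))]]
      [none, none, none] := by
    refine ⟨rfl, rfl, ?_⟩
    intro ax hax3
    have hhash : ∀ ax', ax' < 3 → aHash ax' moons (moons.map (fun _ => [0, 0, 0]))
        = mH moons ax' 0 := by
      intro ax' h3
      exact hash_states moons ax' 0 h3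
    constructor
    · intro x
      interval_cases ax <;>
        simp only [List.getD_cons_zero, List.getD_cons_succ, hhash 0 (by omega),
          hhash 1 (by omega), hhash 2 (by omega)] <;>
        constructor <;> intro h
      · exact ⟨0, le_refl _, by simpa [PySem.Set.mem_ofList] using h⟩
      · obtain ⟨j, hj, hx⟩ := h
        have : j = 0 := by omega
        subst this
        simpa [PySem.Set.mem_ofList] using hx
      · exact ⟨0, le_refl _, by simpa [PySem.Set.mem_ofList] using h⟩
      · obtain ⟨j, hj, hx⟩ := h
        have : j = 0 := by omega
        subst this
        simpa [PySem.Set.mem_ofList] using hx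
      · exact ⟨0, le_refl _, by simpa [PySem.Set.mem_ofList] using h⟩
      · obtain ⟨j, hj, hx⟩ := h
        have : j = 0 := by omega
        subst this
        simpa [PySem.Set.mem_ofList] using hx
    · interval_cases ax <;>
        exact Or.inl ⟨rfl, fun m h1 h2 _ => by omega⟩
  have hnot0 : ¬ AllFoundBy moons 0 := by
    intro h
    obtain ⟨c, fc, hle⟩ := h 0 (by omega)
    have := fc.1
    omega
  have hchar := aLoop_char moons pvFuel 0 _ _ hI0 hnot0
  by_cases hAF : AllFoundBy moons (0 + pvFuel)
  · obtain ⟨c0, c1, c2, f0, f1, f2, heq⟩ := hchar.1 hAF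
    have heq' : aLoop pvFuel moons (moons.map (fun _ => [0, 0, 0]))
        [PySem.Set.ofList [aHash 0 moons (moons.map (fun _ => [0, 0, 0]))],
         PySem.Set.ofList [aHash 1 moons (moons.map (fun _ => [0, 0, 0]))],
         PySem.Set.ofList [aHash 2 moons (moons.map (fun _ => [0, 0, 0]))]]
        [none, none, none] 1
        = some [some (c0 : Int), some (c1 : Int), some (c2 : Int)] := heq
    rw [heq']
    have hle0 : c0 ≤ pvFuel := by
      obtain ⟨c, fc, hle⟩ := hAF 0 (by omega)
      rw [firstCyc_unique moons 0 c0 c f0 fc]; omega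
    have hle1 : c1 ≤ pvFuel := by
      obtain ⟨c, fc, hle⟩ := hAF 1 (by omega)
      rw [firstCyc_unique moons 1 c1 c f1 fc]; omega
    have hle2 : c2 ≤ pvFuel := by
      obtain ⟨c, fc, hle⟩ := hAF 2 (by omega)
      rw [firstCyc_unique moons 2 c2 c f2 fc]; omega
    rw [List.foldl_cons, List.foldl_cons, List.foldl_cons, List.foldl_nil,
      bAxis_some moons 0 (by omega) c0 f0 hle0,
      bAxis_some moons 1 (by omega) c1 f1 hle1,
      bAxis_some moons 2 (by omega) c2 f2 hle2]
    simp
  · have hnone : aLoop pvFuel moons (moons.map (fun _ => [0, 0, 0]))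
        [PySem.Set.ofList [aHash 0 moons (moons.map (fun _ => [0, 0, 0]))],
         PySem.Set.ofList [aHash 1 moons (moons.map (fun _ => [0, 0, 0]))],
         PySem.Set.ofList [aHash 2 moons (moons.map (fun _ => [0, 0, 0]))]]
        [none, none, none] 1 = none := hchar.2 hAF
    rw [hnone]
    simp only [AllFoundBy, not_forall] at hAF
    obtain ⟨ax, hax3, hnf⟩ := hAF
    have hB := bAxis_none moons ax hax3 hnf
    rw [List.foldl_cons, List.foldl_cons, List.foldl_cons, List.foldl_nil]
    interval_cases ax
    · rcases h1 : bAxisCycleLength (moons.map (fun moon => moon.getD 1 0)) with _ | v1 <;>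
        rcases h2 : bAxisCycleLength (moons.map (fun moon => moon.getD 2 0)) with _ | v2 <;>
        simp only [hB, h1, h2]
    · rcases h0 : bAxisCycleLength (moons.map (fun moon => moon.getD 0 0)) with _ | v0 <;>
        rcases h2 : bAxisCycleLength (moons.map (fun moon => moon.getD 2 0)) with _ | v2 <;>
        simp only [hB, h0, h2]
    · rcases h0 : bAxisCycleLength (moons.map (fun moon => moon.getD 0 0)) with _ | v0 <;>
        rcases h1 : bAxisCycleLength (moons.map (fun moon => moon.getD 1 0)) with _ | v1 <;>
        simp only [hB, h0, h1]

-- ===== VERDICT (by name: the statement is the Claim_ definition above) =====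
theorem solution_for_second_task_spec : Claim_equal_solution_for_second_task := by
  intro moons_positions_list _ _
  exact ports_agree moons_positions_list
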